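-- pv_equiv track=rewrite | github.com/xMFAnz4RA5/EX-Batch-obfuscator | ex_obfuscator_hk.py | obfuscate_with_substrings
-- ===== SOURCE A (Python) =====
-- def obfuscate_with_substrings(content: str, mapping: dict) -> str:
--     keys = list(mapping.keys())
--     values = list(mapping.values())
--     result_lines = []
--     for line in content.splitlines():
--         if line.startswith(':'):
--             result_lines.append(line)
--             continue
--         new_line = ''
--         skip = False
--         for ch in line:
--             if skip:
--                 new_line += ch
--                 if ch in ['%', '!']: skip = False
--                 continue
--             if ch in ['%', '!']:
--                 skip = True
--                 new_line += ch
--                 continue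
--             for i, val in enumerate(values):
--                 if ch in val:
--                     new_line += f"%{keys[i]}:~{val.find(ch)},1%"
--                     break
--             else:
--                 new_line += ch
--         result_lines.append(new_line)
--     return '\n'.join(result_lines)
-- ===== SOURCE B (Python) =====
-- def obfuscate_with_substrings(content: str, mapping: dict) -> str:
--     def repl(ch):
--         for key, val in mapping.items():
--             pos = val.find(ch)
--             if pos != -1:
--                 return f"%{key}:~{pos},1%"
--         return ch
--
--     def split_at_marker(s):
--         for j, c in enumerate(s):
--             if c == '%' or c == '!':
--                 return s[:j], c, s[j + 1:]
--         return s, None, ''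
--
--     def process(line):
--         pieces = []
--         rest = line
--         active = True
--         while True:
--             pre, marker, rest = split_at_marker(rest)
--             if active:
--                 pieces.append(''.join(map(repl, pre)))
--             else:
--                 pieces.append(pre)
--             if marker is None:
--                 return ''.join(pieces)
--             pieces.append(marker)
--             active = not active
--
--     out = []
--     for line in content.splitlines():
--         if line.startswith(':'):
--             out.append(line)
--         else:
--             out.append(process(line))
--     return '\n'.join(out)
-- ===== Notes on version B (the rewrite author's own statement) =====
-- stated objective: alternative
-- what changed: Replaces A's per-character skip-flag state machine with chunk-based processing: a helper splits each line at the next '%'/'!' marker, and the loop alternates between replacing a whole active chunk and copying a skipped chunk verbatim.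
import Mathlib
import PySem

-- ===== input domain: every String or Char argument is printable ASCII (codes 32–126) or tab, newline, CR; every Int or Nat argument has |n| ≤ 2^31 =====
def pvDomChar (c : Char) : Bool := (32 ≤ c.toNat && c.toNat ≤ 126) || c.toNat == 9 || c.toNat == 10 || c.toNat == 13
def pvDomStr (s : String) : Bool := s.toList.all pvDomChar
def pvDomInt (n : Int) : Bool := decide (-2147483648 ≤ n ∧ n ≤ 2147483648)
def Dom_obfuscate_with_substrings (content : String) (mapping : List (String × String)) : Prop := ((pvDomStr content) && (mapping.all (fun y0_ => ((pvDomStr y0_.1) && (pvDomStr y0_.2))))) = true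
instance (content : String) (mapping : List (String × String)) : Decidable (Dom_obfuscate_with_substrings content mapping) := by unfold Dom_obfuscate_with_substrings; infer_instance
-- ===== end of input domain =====

-- B re-decomposes A's per-character skip-flag machine into marker-delimited chunk processing
-- (alternative decomposition, same cost); return-value equivalence is proved for all inputs.

-- ===== PORT A =====
-- inner 'for i, val in enumerate(values): if ch in val: … keys[i] …' scan, first hit wins
def replA : List (String × String) → Char → List Char
  | [], c => [c]
  | (k, v) :: rest, c =>
    if PySem.Chars.isIn [c] v.toList then
      '%' :: k.toList ++ [':', '~'] ++ PySem.Int.toChars (PySem.Chars.find v.toList [c]) ++ [',', '1', '%']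
    else replA rest c

-- the per-character loop with the 'skip' flag
def goA (mapping : List (String × String)) : Bool → List Char → List Char
  | _, [] => []
  | skip, c :: cs =>
    if skip then
      c :: goA mapping (if c == '%' || c == '!' then false else true) cs
    else if c == '%' || c == '!' then
      c :: goA mapping true cs
    else
      replA mapping c ++ goA mapping false cs

def obfuscate_with_substrings (content : String) (mapping : List (String × String)) : String :=
  PySem.Str.join "\n" ((PySem.Str.splitlines content).map (fun line =>
    if PySem.Str.startswith line ":" then line
    else String.ofList (goA mapping false line.toList)))

-- ===== PORT B =====
-- inner 'pos = val.find(ch); if pos != -1' scan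
def replB : List (String × String) → Char → List Char
  | [], c => [c]
  | (k, v) :: rest, c =>
    let pos := PySem.Chars.find v.toList [c]
    if pos ≠ -1 then
      '%' :: k.toList ++ [':', '~'] ++ PySem.Int.toChars pos ++ [',', '1', '%']
    else replB rest c

-- split_at_marker: text before the first '%'/'!', the marker (if any), the text after it
def splitAtMarker : List Char → List Char × Option Char × List Char
  | [] => ([], none, [])
  | c :: cs =>
    if c == '%' || c == '!' then ([], some c, cs)
    else
      let r := splitAtMarker cs
      (c :: r.1, r.2.1, r.2.2)

theorem splitAtMarker_len_lt (cs : List Char) (h : (splitAtMarker cs).2.1.isSome) :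
    (splitAtMarker cs).2.2.length < cs.length := by
  induction cs with
  | nil => simp [splitAtMarker] at h
  | cons c cs ih =>
    by_cases hc : (c == '%' || c == '!') = true
    · simp [splitAtMarker, hc]
    · simp only [splitAtMarker, hc] at h ⊢
      simp only [Bool.false_eq_true, if_false] at h ⊢
      exact Nat.lt_succ_of_lt (ih h)

-- the chunk loop: replace the active chunk, copy the skipped chunk, alternate at markers
def goB (mapping : List (String × String)) (active : Bool) (cs : List Char) : List Char :=
  let head := if active then ((splitAtMarker cs).1.map (replB mapping)).flatten else (splitAtMarker cs).1
  if h : (splitAtMarker cs).2.1.isSome then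
    head ++ (splitAtMarker cs).2.1.get h :: goB mapping (!active) (splitAtMarker cs).2.2
  else head
termination_by cs.length
decreasing_by exact splitAtMarker_len_lt cs h

def obfuscate_with_substrings_alt (content : String) (mapping : List (String × String)) : String :=
  PySem.Str.join "\n" ((PySem.Str.splitlines content).map (fun line =>
    if PySem.Str.startswith line ":" then line
    else String.ofList (goB mapping true line.toList)))

-- ===== PRECONDITION & SPEC =====
def Spec_obfuscate_with_substrings (content : String) (mapping : List (String × String)) (out : String) : Prop := out = obfuscate_with_substrings_alt content mapping
instance (content : String) (mapping : List (String × String)) (out : String) : Decidable (Spec_obfuscate_with_substrings content mapping out) := by unfold Spec_obfuscate_with_substrings; infer_instance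

-- ===== CLAIM (what is proved, stated in full; the proofs are below) =====
def Claim_equal_obfuscate_with_substrings : Prop := ∀ (content : String) (mapping : List (String × String)), Dom_obfuscate_with_substrings content mapping → Spec_obfuscate_with_substrings content mapping (obfuscate_with_substrings content mapping)

-- ===== LEMMAS AND PROOFS =====
theorem repl_eq (mapping : List (String × String)) (c : Char) : replA mapping c = replB mapping c := by
  induction mapping with
  | nil => rfl
  | cons kv rest ih =>
    obtain ⟨k, v⟩ := kv
    by_cases h : PySem.Chars.isIn [c] v.toList = true
    · have : PySem.Chars.find v.toList [c] ≠ -1 :=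
        (PySem.Chars.find_ne_neg_one_iff _ _).mpr ((PySem.Chars.isIn_iff_infix _ _).mp h)
      simp [replA, replB, h, this]
    · have : ¬ PySem.Chars.find v.toList [c] ≠ -1 := by
        simp only [ne_eq, not_not]
        exact (PySem.Chars.find_eq_neg_one_iff _ _).mpr
          (fun hinf => h ((PySem.Chars.isIn_iff_infix _ _).mpr hinf))
      simp [replA, replB, h, this, ih]

theorem goB_nil (mapping : List (String × String)) (a : Bool) : goB mapping a [] = [] := by
  rw [goB]; simp [splitAtMarker]

theorem goB_cons_marker (mapping : List (String × String)) (a : Bool) (c : Char) (cs : List Char)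
    (hc : (c == '%' || c == '!') = true) :
    goB mapping a (c :: cs) = c :: goB mapping (!a) cs := by
  rw [goB]; simp [splitAtMarker, hc]

theorem goB_cons_nonmarker (mapping : List (String × String)) (a : Bool) (c : Char) (cs : List Char)
    (hc : ¬ (c == '%' || c == '!') = true) :
    goB mapping a (c :: cs) = (if a then replB mapping c else [c]) ++ goB mapping a cs := by
  conv_lhs => rw [goB]
  conv_rhs => rw [goB]
  simp only [splitAtMarker, hc, Bool.false_eq_true, if_false]
  by_cases hm : (splitAtMarker cs).2.1.isSome
  · cases a <;> simp [hm]
  · cases a <;> simp [hm]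

theorem goA_eq_goB (mapping : List (String × String)) (cs : List Char) :
    goA mapping false cs = goB mapping true cs ∧ goA mapping true cs = goB mapping false cs := by
  induction cs with
  | nil => simp [goA, goB_nil]
  | cons c cs ih =>
    by_cases hc : (c == '%' || c == '!') = true
    · constructor
      · rw [goB_cons_marker _ _ _ _ hc]
        simp [goA, hc, ih.2]
      · rw [goB_cons_marker _ _ _ _ hc]
        simp [goA, hc, ih.1]
    · constructor
      · rw [goB_cons_nonmarker _ _ _ _ hc]
        simp [goA, hc, ih.1, repl_eq]
      · rw [goB_cons_nonmarker _ _ _ _ hc]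
        simp [goA, hc, ih.2]

-- ===== VERDICT (by name: the statement is the Claim_ definition above) =====
theorem obfuscate_with_substrings_spec : Claim_equal_obfuscate_with_substrings := by
  intro content mapping _
  unfold Spec_obfuscate_with_substrings obfuscate_with_substrings obfuscate_with_substrings_alt
  congr 1
  refine List.map_congr_left (fun line _ => ?_)
  simp [(goA_eq_goB mapping line.toList).1]
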